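-- pv_equiv track=rewrite | github.com/SOOIN-KIM/lab-python | scratch04/ex01.py | vector_sum
-- ===== SOURCE A (Python) =====
-- def add(v, w):
--     """
--     주어진 두 개의 n차원 벡터에서 성분별로 더하기를 해서,
--     새로운 n차원 벡터를 리턴s
--
--     :param v: n차원 벡터(성분이 n개인 벡터)
--     :param w: n차원 벡터(성분이 n개인 벡터)
--     :return: 각 성분별로 더하기 결과를 갖는 벡터
--     """
--     # result = []
--     # for i in range(len(v)):
--     #     result.append(v[i] + w[i])
--     # return result
--     if len(v) != len(w):
--         raise ValueError('v와 w는 같은 length를 가져야 함.')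
--     return [v_i + w_i for v_i, w_i in zip(v, w)]
--
-- def vector_sum(vectors):
--     """
--     모든 벡터들에서 각 성분별 더하기를 수행
--     vector_sum([[1, 2], [3, 4], [5, 6]]) = [9, 12]
--
--     :param vectors: n차원 벡터들의 리스트(2차원 리스트)
--     :return: n차원 벡터
--     """
--     num_of_elements = len(vectors[0])
--     for vector in vectors[1:]:
--         if num_of_elements != len(vector):
--             raise ValueError('모든 벡터는 길이가 같아야 함.')
--
--     # result = [0 for _ in range(num_of_elements)]  # [0, 0, 0 , ...]
--     # for i in range(num_of_elements):
--     #     for vector in vectors: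
--     #         result[i] += vector[i]
--     # return result
--     result = vectors[0]
--     for vector in vectors[1:]:
--         result = add(result, vector)
--     return result
-- ===== SOURCE B (Python) =====
-- def vector_sum(vectors):
--     num_of_elements = len(vectors[0])
--     for vector in vectors[1:]:
--         if num_of_elements != len(vector):
--             raise ValueError('모든 벡터는 길이가 같아야 함.')
--     result = []
--     for i in range(num_of_elements):
--         acc = vectors[0][i]
--         for vector in vectors[1:]:
--             acc = acc + vector[i]
--         result.append(acc)
--     return result
-- ===== Notes on version B (the rewrite author's own statement) =====
-- stated objective: alternative
-- what changed: Builds the result column-major: one accumulator per component index, seeded from the first vector and summed over the remaining vectors, instead of A's row-by-row fold through 'add' that allocates a fresh list per vector.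
import Mathlib
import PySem

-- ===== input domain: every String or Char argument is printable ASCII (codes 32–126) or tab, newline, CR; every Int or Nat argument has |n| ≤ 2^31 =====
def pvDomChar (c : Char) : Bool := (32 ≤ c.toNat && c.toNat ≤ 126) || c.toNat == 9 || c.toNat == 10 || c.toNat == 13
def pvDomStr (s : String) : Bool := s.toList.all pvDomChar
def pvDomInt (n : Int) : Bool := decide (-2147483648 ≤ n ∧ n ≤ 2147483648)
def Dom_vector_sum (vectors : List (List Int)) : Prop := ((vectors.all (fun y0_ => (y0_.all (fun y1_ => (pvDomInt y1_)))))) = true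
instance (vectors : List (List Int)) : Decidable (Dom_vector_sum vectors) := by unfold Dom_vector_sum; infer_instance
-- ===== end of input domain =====

-- B builds the result column-major (per-component accumulation) instead of A's row-by-row fold; alternative decomposition, same cost.


-- ===== PORT A =====
-- helper add: [v_i + w_i for v_i, w_i in zip(v, w)] (length check passes inside Pre_)
def pyAdd (v w : List Int) : List Int := (v.zip w).map (fun p => p.1 + p.2)

-- A: result = vectors[0]; for vector in vectors[1:]: result = add(result, vector)
-- (vectors[0] raises IndexError on []; unequal lengths raise ValueError — both excluded by Pre_)
def vector_sum (vectors : List (List Int)) : List Int :=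
  (vectors.drop 1).foldl (fun result vector => pyAdd result vector) (vectors.headD [])

-- ===== PORT B =====
-- B: for each component i, acc = vectors[0][i] then acc += vector[i] over vectors[1:]; append acc
def vector_sum_alt (vectors : List (List Int)) : List Int :=
  (List.range (vectors.headD []).length).map (fun i =>
    (vectors.drop 1).foldl (fun acc vector => acc + vector.getD i 0)
      ((vectors.headD []).getD i 0))

-- ===== PRECONDITION & SPEC =====
-- Pre_ excludes exactly the inputs where A raises: the empty list (IndexError) and
-- lists with vectors of unequal length (ValueError); B raises the same exceptions there.
def Pre_vector_sum (vectors : List (List Int)) : Prop :=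
  vectors ≠ [] ∧ ∀ v ∈ vectors, v.length = (vectors.headD []).length
instance (vectors : List (List Int)) : Decidable (Pre_vector_sum vectors) := by
  unfold Pre_vector_sum; infer_instance

def pvWitness_vector_sum : List (List Int) := [[1, 2], [3, 4], [5, 6]]

def Spec_vector_sum (vectors : List (List Int)) (out : List Int) : Prop := out = vector_sum_alt vectors
instance (vectors : List (List Int)) (out : List Int) : Decidable (Spec_vector_sum vectors out) := by unfold Spec_vector_sum; infer_instance

-- ===== CLAIM (what is proved, stated in full; the proofs are below) =====
def Claim_equal_vector_sum : Prop := ∀ (vectors : List (List Int)), Dom_vector_sum vectors → Pre_vector_sum vectors → Spec_vector_sum vectors (vector_sum vectors)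

-- ===== LEMMAS AND PROOFS =====

theorem map_getD_range (l : List Int) :
    (List.range l.length).map (fun i => l.getD i 0) = l := by
  apply List.ext_getElem
  · simp
  · intro i h1 h2
    simp [List.getD, h2]

theorem pyAdd_length (v w : List Int) : (pyAdd v w).length = min v.length w.length := by
  simp [pyAdd]

theorem pyAdd_getD (v w : List Int) (i : Nat) (hv : i < v.length) (hw : i < w.length) :
    (pyAdd v w).getD i 0 = v.getD i 0 + w.getD i 0 := by
  simp [pyAdd, List.getD, hv, hw]

theorem fold_rowwise_eq_colwise (n : Nat) (vs : List (List Int)) (res : List Int)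
    (hres : res.length = n) (hvs : ∀ v ∈ vs, v.length = n) :
    vs.foldl (fun r v => pyAdd r v) res =
      (List.range n).map (fun i =>
        vs.foldl (fun acc v => acc + v.getD i 0) (res.getD i 0)) := by
  induction vs generalizing res with
  | nil =>
    subst hres
    simpa using (map_getD_range res).symm
  | cons v vs ih =>
    have hv : v.length = n := hvs v (by simp)
    have hlen : (pyAdd res v).length = n := by
      simp [pyAdd_length, hres, hv]
    have := ih (pyAdd res v) hlen (fun w hw => hvs w (by simp [hw]))
    simp only [List.foldl_cons, this]
    apply List.map_congr_left
    intro i hi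
    have hi' : i < n := List.mem_range.mp hi
    rw [pyAdd_getD res v i (by omega) (by omega)]

-- ===== VERDICT (by name: the statement is the Claim_ definition above) =====
theorem vector_sum_spec : Claim_equal_vector_sum := by
  intro vectors _ hpre
  obtain ⟨hne, hlen⟩ := hpre
  unfold Spec_vector_sum vector_sum vector_sum_alt
  obtain ⟨v0, vs, rfl⟩ := List.exists_cons_of_ne_nil hne
  simp only [List.headD_cons, List.drop_one, List.tail_cons]
  exact fold_rowwise_eq_colwise v0.length vs v0 rfl
    (fun v hv => by simpa using hlen v (by simp [hv]))
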